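-- pv_equiv track=rewrite | github.com/guitargnarr/mirador | src/prompt_optimizer.py | _prioritize_constraints
-- ===== SOURCE A (Python) =====
-- from typing import Dict, List, Any, Optional
--
-- def _prioritize_constraints(constraints: List[str]) -> List[str]:
--     """Prioritize constraints by importance."""
--     # Simple prioritization - could be enhanced with ML
--     priority_keywords = ['critical', 'urgent', 'must', 'required', 'essential']
--
--     prioritized = []
--     regular = []
--
--     for constraint in constraints:
--         if any(keyword in constraint.lower() for keyword in priority_keywords):
--             prioritized.append(constraint)
--         else:
--             regular.append(constraint)
--
--     return prioritized + regular
-- ===== SOURCE B (Python) =====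
-- from typing import List
--
-- def _prioritize_constraints(constraints: List[str]) -> List[str]:
--     """Prioritize constraints by importance (stable key sort)."""
--     priority_keywords = ['critical', 'urgent', 'must', 'required', 'essential']
--     return sorted(
--         constraints,
--         key=lambda c: 0 if any(k in c.lower() for k in priority_keywords) else 1,
--     )
-- ===== Notes on version B (the rewrite author's own statement) =====
-- stated objective: idiomatic
-- what changed: Replaces the explicit two-bucket partition-and-concatenate loop with a single stable sort keyed by a binary priority key (0 if a priority keyword occurs in the lowercased constraint, else 1), relying on sort stability to reproduce the exact order.
import Mathlib
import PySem

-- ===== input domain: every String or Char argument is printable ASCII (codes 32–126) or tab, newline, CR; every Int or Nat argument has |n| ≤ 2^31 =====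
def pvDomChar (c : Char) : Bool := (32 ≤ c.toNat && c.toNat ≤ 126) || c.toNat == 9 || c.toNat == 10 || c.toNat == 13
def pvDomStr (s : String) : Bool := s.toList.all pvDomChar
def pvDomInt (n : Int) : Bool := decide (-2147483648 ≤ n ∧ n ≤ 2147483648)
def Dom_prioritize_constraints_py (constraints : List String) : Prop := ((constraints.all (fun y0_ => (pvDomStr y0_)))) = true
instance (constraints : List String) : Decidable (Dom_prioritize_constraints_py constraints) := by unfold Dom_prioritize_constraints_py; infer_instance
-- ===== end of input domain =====

-- B replaces A's explicit two-bucket partition-and-concatenate with one stable sort on a binary priority key (idiomatic; same classification test).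

-- ===== PORT A =====
-- priority_keywords (shared literal list of both programs)
def pvKeywords : List String := ["critical", "urgent", "must", "required", "essential"]

-- 'any(keyword in constraint.lower() for keyword in priority_keywords)' (same test in both programs)
def pvHot (constraint : String) : Bool :=
  pvKeywords.any (fun keyword => PySem.Str.isIn keyword (PySem.Str.lower constraint))

def prioritize_constraints_py (constraints : List String) : List String :=
  let res := constraints.foldl
    (fun (acc : List String × List String) constraint =>
      if pvHot constraint then (acc.1 ++ [constraint], acc.2)
      else (acc.1, acc.2 ++ [constraint]))
    ([], [])
  res.1 ++ res.2

-- ===== PORT B =====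
def prioritize_constraints_py_alt (constraints : List String) : List String :=
  PySem.List.sorted constraints (fun c => if pvHot c then (0 : Int) else 1) false

-- ===== PRECONDITION & SPEC =====
def Spec_prioritize_constraints_py (constraints : List String) (out : List String) : Prop := out = prioritize_constraints_py_alt constraints
instance (constraints : List String) (out : List String) : Decidable (Spec_prioritize_constraints_py constraints out) := by unfold Spec_prioritize_constraints_py; infer_instance

-- ===== CLAIM (what is proved, stated in full; the proofs are below) =====
def Claim_equal_prioritize_constraints_py : Prop := ∀ (constraints : List String), Dom_prioritize_constraints_py constraints → Spec_prioritize_constraints_py constraints (prioritize_constraints_py constraints)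

-- ===== LEMMAS AND PROOFS =====

def pvKey (c : String) : Int := if pvHot c then 0 else 1

def pvBefore (a b : String) : Bool := decide (pvKey a < pvKey b)

-- A's loop, fully generalized: the pair accumulator collects the two filters.
theorem pvFoldA (cs ps rs : List String) :
    cs.foldl (fun (acc : List String × List String) c =>
        if pvHot c then (acc.1 ++ [c], acc.2) else (acc.1, acc.2 ++ [c])) (ps, rs)
      = (ps ++ cs.filter pvHot, rs ++ cs.filter (fun c => !pvHot c)) := by
  induction cs generalizing ps rs with
  | nil => simp
  | cons c cs ih =>
    by_cases h : pvHot c = true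
    · simp [List.foldl_cons, h, ih]
    · simp only [Bool.not_eq_true] at h
      simp [List.foldl_cons, h, ih]

theorem pvInsertBy_skip (x : String) (ps rs : List String)
    (hp : ∀ y ∈ ps, pvBefore x y = false) :
    PySem.List.insertBy pvBefore x (ps ++ rs) = ps ++ PySem.List.insertBy pvBefore x rs := by
  induction ps with
  | nil => simp
  | cons p ps ih =>
    have hpx : pvBefore x p = false := hp p (by simp)
    simp only [List.cons_append, PySem.List.insertBy, hpx]
    simp [ih (fun y hy => hp y (by simp [hy]))]

-- The sorting loop's invariant: hot elements in front, in order, then the rest.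
theorem pvFoldB (cs ps rs : List String)
    (hp : ∀ y ∈ ps, pvHot y = true) (hr : ∀ y ∈ rs, pvHot y = false) :
    cs.foldl (fun acc x => PySem.List.insertBy pvBefore x acc) (ps ++ rs)
      = (ps ++ cs.filter pvHot) ++ (rs ++ cs.filter (fun c => !pvHot c)) := by
  induction cs generalizing ps rs with
  | nil => simp
  | cons c cs ih =>
    by_cases h : pvHot c = true
    · have hins : PySem.List.insertBy pvBefore c (ps ++ rs) = (ps ++ [c]) ++ rs := by
        have hskip : ∀ y ∈ ps, pvBefore c y = false := by
          intro y hy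
          simp [pvBefore, pvKey, h, hp y hy]
        rw [pvInsertBy_skip c ps rs hskip]
        cases rs with
        | nil => simp [PySem.List.insertBy]
        | cons r rs' =>
          have hbr : pvBefore c r = true := by
            simp [pvBefore, pvKey, h, hr r (by simp)]
          simp [PySem.List.insertBy, hbr]
      have hp' : ∀ y ∈ ps ++ [c], pvHot y = true := by
        intro y hy
        rcases List.mem_append.1 hy with hy | hy
        · exact hp y hy
        · simp at hy; simp [hy, h]
      rw [List.foldl_cons, hins, ih (ps ++ [c]) rs hp' hr]
      simp [h]
    · simp only [Bool.not_eq_true] at h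
      have hins : PySem.List.insertBy pvBefore c (ps ++ rs) = ps ++ (rs ++ [c]) := by
        have hall : ∀ y ∈ ps ++ rs, pvBefore c y = false := by
          intro y hy
          rcases List.mem_append.1 hy with hy | hy
          · simp [pvBefore, pvKey, h, hp y hy]
          · simp [pvBefore, pvKey, h, hr y hy]
        rw [PySem.List.insertBy_of_forall_not_before pvBefore c (ps ++ rs) hall]
        simp
      have hr' : ∀ y ∈ rs ++ [c], pvHot y = false := by
        intro y hy
        rcases List.mem_append.1 hy with hy | hy
        · exact hr y hy
        · simp at hy; simp [hy, h]
      rw [List.foldl_cons, hins, ih ps (rs ++ [c]) hp hr']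
      simp [h]

-- ===== VERDICT (by name: the statement is the Claim_ definition above) =====
theorem prioritize_constraints_py_spec : Claim_equal_prioritize_constraints_py := by
  intro cs _
  show prioritize_constraints_py cs = prioritize_constraints_py_alt cs
  have hA : prioritize_constraints_py cs
      = cs.filter pvHot ++ cs.filter (fun c => !pvHot c) := by
    unfold prioritize_constraints_py
    rw [pvFoldA cs [] []]
    simp
  have hB : prioritize_constraints_py_alt cs
      = cs.filter pvHot ++ cs.filter (fun c => !pvHot c) := by
    unfold prioritize_constraints_py_alt
    rw [PySem.List.sorted_eq_foldl_insertBy]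
    have := pvFoldB cs [] [] (by simp) (by simp)
    simpa [pvBefore, pvKey] using this
  rw [hA, hB]
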